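-- pv_equiv track=rewrite | github.com/git25math/25maths | projects/kahoot-channel/agent/scripts/build_kahoot_subtopic_data.py | sync_links
-- ===== SOURCE A (Python) =====
-- def default_link_entry() -> dict[str, str]:
--     return {
--         'kahoot_url': '',
--         'worksheet_payhip_url': '',
--         'bundle_url': '',
--         'past_paper_analysis_url': '',
--         'variant_practice_url': '',
--         'status': 'planned',
--         'notes': '',
--     }
--
-- def sync_links(existing: dict[str, dict[str, str]], ids: list[str]) -> dict[str, dict[str, str]]:
--     merged: dict[str, dict[str, str]] = {}
--     for subtopic_id in ids:
--         row = default_link_entry()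
--         if subtopic_id in existing and isinstance(existing[subtopic_id], dict):
--             for key, value in existing[subtopic_id].items():
--                 if key in row and isinstance(value, str):
--                     row[key] = value
--         merged[subtopic_id] = row
--
--     # Preserve older IDs not present anymore, but mark as archived.
--     for stale_id, stale_value in existing.items():
--         if stale_id in merged:
--             continue
--         if not isinstance(stale_value, dict):
--             continue
--         row = default_link_entry()
--         for key, value in stale_value.items():
--             if key in row and isinstance(value, str):
--                 row[key] = value
--         if row['status'] == 'planned':
--             row['status'] = 'archived'
--         merged[stale_id] = row
--
--     return merged
-- ===== SOURCE B (Python) =====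
-- def default_link_entry() -> dict[str, str]:
--     return {
--         'kahoot_url': '',
--         'worksheet_payhip_url': '',
--         'bundle_url': '',
--         'past_paper_analysis_url': '',
--         'variant_practice_url': '',
--         'status': 'planned',
--         'notes': '',
--     }
--
-- def sync_links(existing: dict[str, dict[str, str]], ids: list[str]) -> dict[str, dict[str, str]]:
--     # One pass over the ordered union of ids and existing keys; archive non-active planned rows.
--     active = set(ids)
--     merged: dict[str, dict[str, str]] = {}
--     for key in dict.fromkeys(list(ids) + list(existing)):
--         entry = default_link_entry()
--         src = existing.get(key)
--         if isinstance(src, dict):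
--             for k, v in src.items():
--                 if k in entry and isinstance(v, str):
--                     entry[k] = v
--         if key not in active and entry['status'] == 'planned':
--             entry['status'] = 'archived'
--         merged[key] = entry
--     return merged
-- ===== Notes on version B (the rewrite author's own statement) =====
-- stated objective: alternative
-- what changed: Replaces A's two dependent passes (ids pass, then a stale pass over existing guarded by 'in merged') with a single pass over the ordered key union dict.fromkeys(ids + list(existing)), using an 'active' set membership branch to decide archiving.
import Mathlib
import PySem

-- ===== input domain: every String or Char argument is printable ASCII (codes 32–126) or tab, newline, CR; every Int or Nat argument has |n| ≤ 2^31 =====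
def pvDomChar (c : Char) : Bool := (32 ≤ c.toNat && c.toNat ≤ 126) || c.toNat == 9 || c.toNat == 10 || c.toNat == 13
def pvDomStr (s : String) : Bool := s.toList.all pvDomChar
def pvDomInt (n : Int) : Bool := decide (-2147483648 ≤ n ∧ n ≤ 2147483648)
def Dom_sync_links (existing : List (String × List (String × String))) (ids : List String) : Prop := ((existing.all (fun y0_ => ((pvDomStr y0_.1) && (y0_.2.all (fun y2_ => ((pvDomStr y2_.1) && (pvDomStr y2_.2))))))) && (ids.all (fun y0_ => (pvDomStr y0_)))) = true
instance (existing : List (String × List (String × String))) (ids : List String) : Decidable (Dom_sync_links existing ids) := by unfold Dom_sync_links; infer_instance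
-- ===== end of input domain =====

-- B replaces A's two dependent passes with a single pass over the ordered union of ids and
-- existing's keys (objective: alternative decomposition, same asymptotic cost).

-- ===== PORT A =====
-- default_link_entry() — shared by both Pythons
def defaultLinkEntry : PySem.Dict String String :=
  PySem.Dict.mk [("kahoot_url", ""), ("worksheet_payhip_url", ""), ("bundle_url", ""),
    ("past_paper_analysis_url", ""), ("variant_practice_url", ""),
    ("status", "planned"), ("notes", "")]

-- the guarded 'for key, value in …: if key in row and isinstance(value, str): row[key] = value'
-- loop, textually identical in both Pythons (isinstance(value, str) is always true under the type convention)
def overlayRow (src : List (String × String)) : PySem.Dict String String :=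
  src.foldl (fun r p => if r.contains p.1 then r.insert p.1 p.2 else r) defaultLinkEntry

-- 'existing.get(key)' (resp. 'key in existing' + 'existing[key]') followed by the overlay loop
def rowBase (existing : List (String × List (String × String))) (k : String) : PySem.Dict String String :=
  match existing.lookup k with
  | some entry => overlayRow entry
  | none => defaultLinkEntry

def sync_links (existing : List (String × List (String × String))) (ids : List String) : List (String × List (String × String)) :=
  let merged := ids.foldl
    (fun (m : PySem.Dict String (List (String × String))) sid =>
      -- 'if subtopic_id in existing and isinstance(existing[subtopic_id], dict)' + overlay loop
      let row := rowBase existing sid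
      m.insert sid row.items)
    PySem.Dict.empty
  let merged := existing.foldl
    (fun (m : PySem.Dict String (List (String × String))) p =>
      if m.contains p.1 then m
      else
        let row := overlayRow p.2
        let row := if row.getD "status" "" = "planned" then row.insert "status" "archived" else row
        m.insert p.1 row.items)
    merged
  merged.items

-- ===== PORT B =====
def sync_links_alt (existing : List (String × List (String × String))) (ids : List String) : List (String × List (String × String)) :=
  let active : PySem.Set String := PySem.Set.ofList ids
  let merged := (PySem.List.dedup (ids ++ existing.map (·.1))).foldl
    (fun (m : PySem.Dict String (List (String × String))) key =>
      let entry := rowBase existing key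
      let entry := if ¬ PySem.Set.contains active key = true ∧ entry.getD "status" "" = "planned"
                   then entry.insert "status" "archived" else entry
      m.insert key entry.items)
    PySem.Dict.empty
  merged.items

-- ===== PRECONDITION & SPEC =====
def Spec_sync_links (existing : List (String × List (String × String))) (ids : List String) (out : List (String × List (String × String))) : Prop := out = sync_links_alt existing ids
instance (existing : List (String × List (String × String))) (ids : List String) (out : List (String × List (String × String))) : Decidable (Spec_sync_links existing ids out) := by unfold Spec_sync_links; infer_instance

-- ===== CLAIM (what is proved, stated in full; the proofs are below) =====
def Claim_equal_sync_links : Prop := ∀ (existing : List (String × List (String × String))) (ids : List String), Dom_sync_links existing ids → Spec_sync_links existing ids (sync_links existing ids)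

-- ===== LEMMAS AND PROOFS =====

-- A fold that inserts a value computed purely from the key yields the key-dedup, mapped.
theorem items_foldl_insert_fun {V : Type} (l : List String) (f : String → V) :
    (l.foldl (fun (m : PySem.Dict String V) k => m.insert k (f k)) PySem.Dict.empty).items
      = (PySem.List.dedup l).map (fun k => (k, f k)) := by
  induction l using List.reverseRecOn with
  | nil => rfl
  | append_singleton l k ih =>
    rw [List.foldl_append]
    simp only [List.foldl_cons, List.foldl_nil]
    have hc : (l.foldl (fun (m : PySem.Dict String V) k => m.insert k (f k)) PySem.Dict.empty).contains k
        = List.contains (PySem.List.dedup l) k := by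
      simp [PySem.Dict.contains, ih, List.any_map, Function.comp_def, List.contains_eq_mem,
        PySem.Set.mem_ofList, PySem.List.dedup, List.any_beq']
    rw [PySem.Dict.insert, hc]
    simp only [PySem.List.dedup] at *
    rw [PySem.Set.ofList_append_singleton, PySem.Set.add]
    simp only [PySem.Set.contains]
    by_cases hm : List.contains (PySem.Set.ofList l) k = true
    · rw [if_pos hm, if_pos hm, ih, List.map_map]
      apply List.map_congr_left
      intro j hj
      by_cases hjk : j = k
      · subst hjk; simp
      · simp [hjk]
    · rw [if_neg hm, if_neg hm, ih]
      simp

-- first pair for each key, in order of first occurrence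
def firstsBy {α : Type} (l : List (String × α)) : List (String × α) :=
  match l with
  | [] => []
  | p :: t => p :: (firstsBy t).filter (fun q => !(q.1 == p.1))

theorem map_fst_firstsBy {α : Type} (l : List (String × α)) :
    (firstsBy l).map (·.1) = PySem.List.dedup (l.map (·.1)) := by
  induction l with
  | nil => rfl
  | cons p t ih =>
    simp only [firstsBy, List.map_cons, PySem.List.dedup, PySem.Set.ofList_cons,
      PySem.Set.discard]
    rw [show (fun (q : String × α) => !(q.1 == p.1)) = ((fun y => !(y == p.1)) ∘ (·.1)) from rfl,
      ← List.filter_map, ih]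
    rfl

theorem lookup_of_mem_firstsBy {α : Type} (l : List (String × α)) (q : String × α)
    (hq : q ∈ firstsBy l) : l.lookup q.1 = some q.2 := by
  induction l with
  | nil => cases hq
  | cons p t ih =>
    simp only [firstsBy, List.mem_cons, List.mem_filter] at hq
    rcases hq with h | ⟨h1, h2⟩
    · subst h; simp [List.lookup]
    · obtain ⟨pk, pv⟩ := p
      have hne : (q.1 == pk) = false := by
        cases h : (q.1 == pk) <;> simp_all
      simp only [List.lookup, hne]
      exact ih h1

-- A's second, 'skip if already merged' loop appends the fresh first-occurrence pairs.
theorem items_foldl_skip_insert {α V : Type} (l : List (String × α))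
    (d : PySem.Dict String V) (g : String → α → V) :
    ((l.foldl (fun (m : PySem.Dict String V) p =>
        if m.contains p.1 then m else m.insert p.1 (g p.1 p.2)) d).items)
      = d.items ++ ((firstsBy l).filter (fun q => !(d.contains q.1))).map
          (fun q => (q.1, g q.1 q.2)) := by
  induction l generalizing d with
  | nil => simp [firstsBy]
  | cons p t ih =>
    simp only [List.foldl_cons, firstsBy]
    by_cases h : d.contains p.1 = true
    · rw [if_pos h, ih]
      congr 1
      rw [List.filter_cons]
      simp only [h, Bool.not_true, if_neg (by simp : ¬ (false = true))]
      rw [List.filter_filter]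
      apply congrArg
      apply List.filter_congr
      intro q hq
      by_cases hqp : (q.1 == p.1) = true
      · have : q.1 = p.1 := by simpa using hqp
        simp [this, h]
      · simp [hqp]
    · rw [if_neg h, ih]
      have hins : (d.insert p.1 (g p.1 p.2)).items = d.items ++ [(p.1, g p.1 p.2)] := by
        rw [PySem.Dict.insert, if_neg h]
      rw [hins, List.append_assoc]
      congr 1
      rw [List.filter_cons]
      simp only [h, Bool.not_false]
      rw [List.filter_filter]
      simp only [PySem.Dict.contains_insert, Bool.not_or]
      have := List.filter_congr (l := firstsBy t)
        (p := fun q => !q.1 == p.1 && !d.contains q.1)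
        (q := fun a => !d.contains a.1 && !a.1 == p.1)
        (fun q _ => Bool.and_comm _ _)
      rw [this]
      simp

theorem sync_links_eq_alt (existing : List (String × List (String × String))) (ids : List String) :
    sync_links existing ids = sync_links_alt existing ids := by
  simp only [sync_links, sync_links_alt]
  rw [items_foldl_skip_insert existing _ (fun k v =>
        (if (overlayRow v).getD "status" "" = "planned" then (overlayRow v).insert "status" "archived"
         else overlayRow v).items),
      items_foldl_insert_fun ids (fun sid => (rowBase existing sid).items),
      items_foldl_insert_fun]
  have hcont : ∀ k, (List.foldl (fun (m : PySem.Dict String (List (String × String))) sid =>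
      m.insert sid (rowBase existing sid).items) PySem.Dict.empty ids).contains k
      = decide (k ∈ ids) := by
    intro k
    simp [PySem.Dict.contains, items_foldl_insert_fun, List.any_map, Function.comp_def,
      PySem.List.dedup, PySem.Set.mem_ofList, List.any_beq', List.contains_eq_mem]
  have hsc : ∀ y, PySem.Set.contains (PySem.Set.ofList ids) y = decide (y ∈ ids) := by
    intro y
    simp [PySem.Set.contains, List.contains_eq_mem, PySem.Set.mem_ofList]
  simp only [hcont, hsc]
  rw [show PySem.List.dedup (PySem.List.dedup (ids ++ existing.map (·.1)))
        = PySem.List.dedup (ids ++ existing.map (·.1)) from PySem.Set.ofList_ofList _]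
  rw [show PySem.List.dedup (ids ++ existing.map (·.1))
        = PySem.Set.ofList ids ++ (PySem.Set.ofList (existing.map (·.1))).filter
            (fun y => !(PySem.Set.contains (PySem.Set.ofList ids) y)) by
      rw [PySem.List.dedup, PySem.Set.ofList_append, PySem.Set.update_eq_append_filter]]
  simp only [hsc]
  rw [List.map_append]
  congr 1
  · -- active part
    apply List.map_congr_left
    intro k hk
    have hk' : k ∈ ids := (PySem.Set.mem_ofList _ _).mp hk
    simp [hk']
  · -- stale part
    rw [show (PySem.Set.ofList (existing.map (·.1))) = PySem.List.dedup (existing.map (·.1)) from rfl,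
      ← map_fst_firstsBy existing, List.filter_map, List.map_map]
    simp only [Function.comp_def]
    apply List.map_congr_left
    intro q hq
    rw [List.mem_filter] at hq
    obtain ⟨hq1, hq2⟩ := hq
    have hnid : ¬ q.1 ∈ ids := by simpa using hq2
    have hrb : rowBase existing q.1 = overlayRow q.2 := by
      rw [rowBase, lookup_of_mem_firstsBy existing q hq1]
    simp [hrb, hnid]

-- ===== VERDICT (by name: the statement is the Claim_ definition above) =====
theorem sync_links_spec : Claim_equal_sync_links := by
  intro existing ids _
  unfold Spec_sync_links
  exact sync_links_eq_alt existing ids
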